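-- pv_equiv track=rewrite | github.com/Kesari-Bharat-Backend-Team/aws-new-poi | address_parser_building_number_making_sub_loc_list.py | removeStartingdata
-- ===== SOURCE A (Python) =====
-- def removeStartingdata(string):
--
-- 	s = string.split(" ")
--
-- 	answer = ""
-- 	flag = True
-- 	for word in s:
--
-- 		if flag and len(word) <= 5 and sum([1 for ch in word if ch.isdigit()]) >= 1 and 'zone' not in word.lower() and 'st'.upper() not in word.upper() and 'nd'.upper() not in word.upper():
-- 			pass
-- 		else:
-- 			flag = False
-- 			answer = answer +  " " + word
--
-- 	return answer if answer else ""
-- ===== SOURCE B (Python) =====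
-- def removeStartingdata(string):
--     # Walk a cursor over the string itself: peel one word at a time with
--     # partition; at the first word that is not number-like, return the
--     # untouched remainder of the original string (no word list, no join).
--     def number_like(w):
--         return (len(w) <= 5 and any(ch.isdigit() for ch in w)
--                 and 'zone' not in w.lower()
--                 and 'ST' not in w.upper() and 'ND' not in w.upper())
--     s = string
--     while True:
--         word, sep, rest = s.partition(" ")
--         if not number_like(word):
--             return " " + s
--         if not sep:
--             return ""
--         s = rest
-- ===== Notes on version B (the rewrite author's own statement) =====
-- stated objective: alternative
-- what changed: A splits the whole string into a word list and rebuilds the answer with a flag-carrying accumulator loop and string concatenation; B never builds a word list: it walks a cursor over the string itself, peeling one word at a time with str.partition, and returns a leading space plus the untouched remainder of the original string at the first non-number-like word.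
import Mathlib
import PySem

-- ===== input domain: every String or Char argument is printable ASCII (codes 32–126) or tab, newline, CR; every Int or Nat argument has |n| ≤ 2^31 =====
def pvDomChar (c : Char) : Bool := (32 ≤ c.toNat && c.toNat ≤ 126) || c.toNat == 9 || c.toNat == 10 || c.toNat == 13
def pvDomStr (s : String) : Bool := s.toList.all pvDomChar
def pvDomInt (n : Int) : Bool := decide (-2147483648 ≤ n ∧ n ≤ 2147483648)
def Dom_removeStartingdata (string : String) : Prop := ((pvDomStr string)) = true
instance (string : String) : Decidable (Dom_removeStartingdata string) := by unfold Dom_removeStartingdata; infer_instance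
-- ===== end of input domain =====

-- B replaces A's split-into-a-list + flag-carrying accumulator loop by a cursor that walks the
-- string itself, peeling one word at a time with partition and returning the untouched remainder;
-- objective: alternative (no word list is built and no join/reassembly happens).

-- ===== PORT A =====
-- A's loop state: (answer as List Char, flag); string work done on List Char as PySem prescribes.
def removeStartingdata (string : String) : String :=
  let s := PySem.Chars.splitOn string.toList " ".toList
  let res := s.foldl (fun (st : List Char × Bool) word =>
      if st.2
         && decide (PySem.Chars.len word ≤ 5)
         && decide (1 ≤ (((word.filter (fun ch => PySem.Chars.isdigit ch)).map (fun _ => (1 : Int))).sum))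
         && !(PySem.Chars.isIn "zone".toList (PySem.Chars.lower word))
         && !(PySem.Chars.isIn (PySem.Chars.upper "st".toList) (PySem.Chars.upper word))
         && !(PySem.Chars.isIn (PySem.Chars.upper "nd".toList) (PySem.Chars.upper word))
      then st
      else (st.1 ++ [' '] ++ word, false)) ([], true)
  if res.1.isEmpty then "" else String.ofList res.1

-- ===== PORT B =====
-- number_like(w) from Source B
def numberLike (word : List Char) : Bool :=
  decide (PySem.Chars.len word ≤ 5)
  && decide (1 ≤ (((word.filter (fun ch => PySem.Chars.isdigit ch)).map (fun _ => (1 : Int))).sum))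
  && !(PySem.Chars.isIn "zone".toList (PySem.Chars.lower word))
  && !(PySem.Chars.isIn "ST".toList (PySem.Chars.upper word))
  && !(PySem.Chars.isIn "ND".toList (PySem.Chars.upper word))

-- Source B's while-loop over the suffix cursor s, as the obvious structural recursion on the suffix;
-- s.partition(" ") is exactly (takeWhile (≠ ' '), the first space if any, the rest after it).
def altGo (cs : List Char) : List Char :=
  let word := cs.takeWhile (fun c => decide (c ≠ ' '))
  if numberLike word then
    match h : cs.dropWhile (fun c => decide (c ≠ ' ')) with
    | [] => []                  -- sep = "": the whole remainder was one number-like word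
    | _ :: rest => altGo rest   -- continue after the first space
  else ' ' :: cs                -- return " " + s: the untouched remainder of the string
termination_by cs.length
decreasing_by
  have := List.length_dropWhile_le (fun c => decide (c ≠ ' ')) cs
  rw [h] at this
  simp at this
  omega

def removeStartingdata_alt (string : String) : String :=
  String.ofList (altGo string.toList)

-- ===== PRECONDITION & SPEC =====
def Spec_removeStartingdata (string : String) (out : String) : Prop := out = removeStartingdata_alt string
instance (string : String) (out : String) : Decidable (Spec_removeStartingdata string out) := by unfold Spec_removeStartingdata; infer_instance

-- ===== CLAIM (what is proved, stated in full; the proofs are below) =====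
def Claim_equal_removeStartingdata : Prop := ∀ (string : String), Dom_removeStartingdata string → Spec_removeStartingdata string (removeStartingdata string)

-- ===== LEMMAS AND PROOFS =====

-- A's fold step, named for the proofs
def aStep (st : List Char × Bool) (word : List Char) : List Char × Bool :=
  if st.2
     && decide (PySem.Chars.len word ≤ 5)
     && decide (1 ≤ (((word.filter (fun ch => PySem.Chars.isdigit ch)).map (fun _ => (1 : Int))).sum))
     && !(PySem.Chars.isIn "zone".toList (PySem.Chars.lower word))
     && !(PySem.Chars.isIn (PySem.Chars.upper "st".toList) (PySem.Chars.upper word))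
     && !(PySem.Chars.isIn (PySem.Chars.upper "nd".toList) (PySem.Chars.upper word))
  then st
  else (st.1 ++ [' '] ++ word, false)

theorem aStep_false (ans : List Char) (word : List Char) :
    aStep (ans, false) word = (ans ++ [' '] ++ word, false) := by
  simp [aStep]

theorem aStep_true (ans : List Char) (word : List Char) :
    aStep (ans, true) word
      = if numberLike word then (ans, true) else (ans ++ [' '] ++ word, false) := by
  simp [aStep, numberLike]
  rfl

theorem foldl_aStep_false (l : List (List Char)) (ans : List Char) :
    l.foldl aStep (ans, false) = (ans ++ (l.map (fun w => [' '] ++ w)).flatten, false) := by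
  induction l generalizing ans with
  | nil => simp
  | cons w l ih =>
    simp only [List.foldl_cons, aStep_false, List.map_cons, List.flatten_cons, ih]
    simp

theorem foldl_aStep_true (l : List (List Char)) :
    l.foldl aStep ([], true)
      = (((l.dropWhile numberLike).map (fun w => [' '] ++ w)).flatten,
         (l.dropWhile numberLike).isEmpty) := by
  induction l with
  | nil => simp
  | cons w l ih =>
    by_cases h : numberLike w = true
    · simpa only [List.foldl_cons, aStep_true, h, if_pos, List.dropWhile_cons_of_pos] using ih
    · rw [List.foldl_cons, aStep_true, if_neg (by simp [h]),
        List.dropWhile_cons_of_neg (by simp [h]), List.nil_append, foldl_aStep_false]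
      simp

-- PySem.Chars.splitOn with separator " " is Mathlib's splitOnP on (· == ' ')
theorem splitOn_go_spec (fuel : Nat) (l cur : List Char) (acc : List (List Char)) (hf : l.length ≤ fuel) :
    PySem.Chars.splitOn.go [' '] fuel l cur acc
      = acc.reverse ++ (List.splitOnP (fun c => c == ' ') l).modifyHead (cur.reverse ++ ·) := by
  induction fuel generalizing l cur acc with
  | zero =>
    have : l = [] := List.length_eq_zero_iff.mp (Nat.le_zero.mp hf)
    subst this
    simp [PySem.Chars.splitOn.go, List.splitOnP_nil]
  | succ fuel ih =>
    cases l with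
    | nil => simp [PySem.Chars.splitOn.go, List.splitOnP_nil]
    | cons c rest =>
      by_cases hc : c = ' '
      · subst hc
        rw [show PySem.Chars.splitOn.go [' '] (fuel + 1) (' ' :: rest) cur acc
              = PySem.Chars.splitOn.go [' '] fuel rest [] (cur.reverse :: acc) by
            simp [PySem.Chars.splitOn.go, List.isPrefixOf]]
        rw [ih rest [] (cur.reverse :: acc) (by simpa using Nat.lt_succ_iff.mp (by simpa using hf))]
        rw [List.splitOnP_cons]
        simp [show (fun (x : List Char) => x) = id from rfl, List.modifyHead_id]
      · rw [show PySem.Chars.splitOn.go [' '] (fuel + 1) (c :: rest) cur acc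
              = PySem.Chars.splitOn.go [' '] fuel rest (c :: cur) acc by
            simp [PySem.Chars.splitOn.go, List.isPrefixOf, Ne.symm hc]]
        rw [ih rest (c :: cur) acc (by simpa using Nat.lt_succ_iff.mp (by simpa using hf))]
        rw [List.splitOnP_cons]
        simp [hc, List.modifyHead_modifyHead, Function.comp_def]

theorem splitOn_space (cs : List Char) :
    PySem.Chars.splitOn cs " ".toList = List.splitOnP (fun c => c == ' ') cs := by
  have h := splitOn_go_spec (cs.length + 1) cs [] [] (Nat.le_succ _)
  simpa [PySem.Chars.splitOn, show (fun (x : List Char) => x) = id from rfl,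
    List.modifyHead_id] using h

-- reconstruction: flattening " "+word over the split gives back " " + the string
theorem flatten_map_splitOnP (cs : List Char) :
    ((List.splitOnP (fun c => c == ' ') cs).map (fun w => [' '] ++ w)).flatten = ' ' :: cs := by
  induction cs with
  | nil => simp [List.splitOnP_nil]
  | cons c rest ih =>
    rw [List.splitOnP_cons]
    by_cases hc : c = ' '
    · subst hc; simpa using ih
    · simp only [beq_iff_eq, hc, reduceIte]
      rcases List.exists_cons_of_ne_nil (List.splitOnP_ne_nil (fun c => c == ' ') rest) with ⟨h, t, ht⟩
      rw [ht] at ih ⊢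
      simp only [List.modifyHead_cons, List.map_cons, List.flatten_cons] at ih ⊢
      simp only [List.cons_append, List.nil_append] at ih ⊢
      rw [List.cons_inj_right] at ih
      simp [ih]

-- head structure of splitOnP: first chunk is takeWhile
theorem splitOnP_head (cs : List Char) :
    List.splitOnP (fun c => c == ' ') cs
      = cs.takeWhile (fun c => decide (c ≠ ' ')) :: (List.splitOnP (fun c => c == ' ') cs).tail := by
  induction cs with
  | nil => simp [List.splitOnP_nil]
  | cons c rest ih =>
    rw [List.splitOnP_cons]
    by_cases hc : c = ' '
    · subst hc; simp
    · rcases List.exists_cons_of_ne_nil (List.splitOnP_ne_nil (fun c => c == ' ') rest) with ⟨h, t, ht⟩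
      rw [ht] at ih ⊢
      simp only [List.modifyHead_cons]
      simp only [List.cons.injEq] at ih
      simp [hc, ih.1]

-- whole string one chunk when it has no space
theorem splitOnP_no_space (cs : List Char) (h : ∀ x ∈ cs, x ≠ ' ') :
    List.splitOnP (fun c => c == ' ') cs = [cs] := by
  induction cs with
  | nil => simp [List.splitOnP_nil]
  | cons c rest ih =>
    rw [List.splitOnP_cons]
    have hc : c ≠ ' ' := h c (List.mem_cons_self ..)
    rw [if_neg (by simp [hc]), ih (fun x hx => h x (List.mem_cons_of_mem _ hx))]
    simp

-- the heart: B's cursor recursion computes exactly A's dropWhile-of-the-split result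
theorem altGo_spec (cs : List Char) :
    altGo cs
      = (let l := (List.splitOnP (fun c => c == ' ') cs).dropWhile numberLike
         if l.isEmpty then [] else (l.map (fun w => [' '] ++ w)).flatten) := by
  induction hn : cs.length using Nat.strong_induction_on generalizing cs with
  | _ n ih =>
  subst hn
  rw [altGo]
  by_cases hw : numberLike (cs.takeWhile (fun c => decide (c ≠ ' '))) = true
  · rw [if_pos hw]
    cases hd : cs.dropWhile (fun c => decide (c ≠ ' ')) with
    | nil =>
      -- no space in cs: the split is [cs], cs itself is number-like, result []
      have hns : ∀ x ∈ cs, x ≠ ' ' := by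
        intro x hx
        have := List.dropWhile_eq_nil_iff.mp hd x hx
        simpa using this
      have hcs : cs.takeWhile (fun c => decide (c ≠ ' ')) = cs :=
        List.takeWhile_eq_self_iff.mpr (by intro x hx; simpa using hns x hx)
      rw [splitOnP_no_space cs hns]
      rw [hcs] at hw
      simp [List.dropWhile_cons_of_pos, hw]
    | cons c rest =>
      -- cs = word ++ ' ' :: rest; the split is word :: split rest and word is dropped
      have hc : c = ' ' := by
        have hne : cs.dropWhile (fun c => decide (c ≠ ' ')) ≠ [] := by
          rw [hd]; exact List.cons_ne_nil _ _
        have h1 := List.head_dropWhile_not (fun c => decide (c ≠ ' ')) (l := cs) hne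
        have h2 : (cs.dropWhile (fun c => decide (c ≠ ' '))).head hne = c := by
          simp only [hd, List.head_cons]
        rw [h2] at h1
        simpa using h1
      have hsplit : cs = cs.takeWhile (fun c => decide (c ≠ ' ')) ++ ' ' :: rest := by
        conv_lhs => rw [← List.takeWhile_append_dropWhile (p := fun c => decide (c ≠ ' ')) (l := cs)]
        rw [hd, hc]
      have hfirst : List.splitOnP (fun c => c == ' ') cs
          = cs.takeWhile (fun c => decide (c ≠ ' ')) :: List.splitOnP (fun c => c == ' ') rest := by
        conv_lhs => rw [hsplit]
        exact List.splitOnP_first _ _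
          (by intro x hx; have := List.mem_takeWhile_imp hx; simpa using this) ' ' (by simp) rest
      have hlen : rest.length < cs.length := by
        have h1 := List.length_dropWhile_le (fun c => decide (c ≠ ' ')) cs
        rw [hd] at h1
        simp at h1
        omega
      have hred : (match h : c :: rest with
          | [] => ([] : List Char)
          | _ :: rest' => altGo rest') = altGo rest := rfl
      rw [hred, ih rest.length hlen rest rfl]
      rw [hfirst, List.dropWhile_cons_of_pos hw]
  · rw [if_neg hw]
    -- first chunk fails number_like: nothing is dropped, flatten reconstructs ' ' :: cs
    have hhead := splitOnP_head cs
    have hdw : (List.splitOnP (fun c => c == ' ') cs).dropWhile numberLike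
        = List.splitOnP (fun c => c == ' ') cs := by
      rw [hhead, List.dropWhile_cons_of_neg (by simpa using hw), ← hhead]
    simp only [hdw]
    rw [if_neg (by simp [List.splitOnP_ne_nil]), flatten_map_splitOnP]

-- ===== VERDICT (by name: the statement is the Claim_ definition above) =====
theorem removeStartingdata_spec : Claim_equal_removeStartingdata := by
  intro string _
  unfold Spec_removeStartingdata removeStartingdata removeStartingdata_alt
  show (let res := (PySem.Chars.splitOn string.toList " ".toList).foldl aStep ([], true);
        if res.1.isEmpty then "" else String.ofList res.1) = _
  rw [splitOn_space, foldl_aStep_true, altGo_spec]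
  simp only []
  by_cases h : (List.splitOnP (fun c => c == ' ') string.toList).dropWhile numberLike = []
  · rw [h]
    simp [String.ofList]
    decide
  · rcases List.exists_cons_of_ne_nil h with ⟨w, t, hwt⟩
    rw [hwt]
    simp
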